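-- pv_equiv track=rewrite | github.com/vjsingh1984/victor | victor/core/graph_rag/requirement_graph.py | _parse_requirements_file
-- ===== SOURCE A (Python) =====
-- from typing import Any, Dict, List, Optional, Set, Tuple, TYPE_CHECKING
--
-- def _parse_requirements_file(content: str) -> List[str]:
--     """Parse requirements from file content.
--
--     Args:
--         content: File content
--
--     Returns:
--         List of requirement texts
--     """
--     requirements: List[str] = []
--
--     # Try markdown format (# headers)
--     lines = content.splitlines()
--     current_req: List[str] = []
--
--     for line in lines:
--         if line.startswith("# "):
--             # New requirement
--             if current_req:
--                 requirements.append("\n".join(current_req).strip())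
--             current_req = [line[2:].strip()]
--         elif line.strip() and current_req:
--             current_req.append(line.strip())
--
--     if current_req:
--         requirements.append("\n".join(current_req).strip())
--
--     # If no markdown format found, split by blank lines
--     if not requirements:
--         requirements = [r.strip() for r in content.split("\n\n") if r.strip()]
--
--     return requirements
-- ===== SOURCE B (Python) =====
-- from typing import List
--
-- def _parse_requirements_file(content: str) -> List[str]:
--     lines = content.splitlines()
--     idxs = [i for i, ln in enumerate(lines) if ln.startswith("# ")]
--     reqs: List[str] = []
--     for start, end in zip(idxs, idxs[1:] + [len(lines)]):
--         body = [ln.strip() for ln in lines[start + 1:end] if ln.strip()]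
--         reqs.append("\n".join([lines[start][2:].strip()] + body).strip())
--     if not reqs:
--         reqs = [r.strip() for r in content.split("\n\n") if r.strip()]
--     return reqs
-- ===== Notes on version B (the rewrite author's own statement) =====
-- stated objective: alternative
-- what changed: Replaces A's single incremental accumulator loop (requirements/current_req state) with an index-first pass: collect the positions of '# ' header lines once, then build each requirement independently from the slice of lines between consecutive header positions, keeping the blank-line fallback when no headers exist.
import Mathlib
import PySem

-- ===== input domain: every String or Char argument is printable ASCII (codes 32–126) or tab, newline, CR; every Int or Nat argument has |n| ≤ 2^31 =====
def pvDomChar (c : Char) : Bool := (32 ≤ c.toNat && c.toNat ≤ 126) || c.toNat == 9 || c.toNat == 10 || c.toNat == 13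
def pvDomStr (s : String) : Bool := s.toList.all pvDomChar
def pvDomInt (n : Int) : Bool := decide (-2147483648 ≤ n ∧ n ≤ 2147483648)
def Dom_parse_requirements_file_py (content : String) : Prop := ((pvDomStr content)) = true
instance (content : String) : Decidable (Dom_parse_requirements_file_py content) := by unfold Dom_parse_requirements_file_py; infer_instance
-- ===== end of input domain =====

-- B replaces A's incremental accumulator loop with an index-first pass over header positions (objective: alternative, same cost).

-- ===== PORT A =====
-- "\n".join(current_req).strip()
def paFlush (g : List String) : String := PySem.Str.strip (PySem.Str.join "\n" g)

-- the body of A's for-loop, one line at a time over the state (requirements, current_req)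
def paStep (st : List String × List String) (line : String) : List String × List String :=
  if PySem.Str.startswith line "# " then
    ((if st.2 = [] then st.1 else st.1 ++ [paFlush st.2]),
     [PySem.Str.strip (PySem.Str.slice line (some 2) none)])
  else if PySem.Str.strip line != "" && !st.2.isEmpty then
    (st.1, st.2 ++ [PySem.Str.strip line])
  else st

def parse_requirements_file_py (content : String) : List String :=
  let lines := PySem.Str.splitlines content
  let st := lines.foldl paStep ([], [])
  let reqs := if st.2 = [] then st.1 else st.1 ++ [paFlush st.2]
  if reqs = [] then
    -- content.split("\n\n"): sep is the nonempty literal, so split? is always some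
    (((PySem.Str.split? content "\n\n").getD []).filter (fun r => PySem.Str.strip r != "")).map PySem.Str.strip
  else reqs

-- ===== PORT B =====
def parse_requirements_file_py_alt (content : String) : List String :=
  let lines := PySem.Str.splitlines content
  -- [i for i, ln in enumerate(lines) if ln.startswith("# ")]; the enumerate indices are the Nat positions
  let idxs := (lines.zipIdx).filterMap (fun p => if PySem.Str.startswith p.1 "# " then some p.2 else none)
  -- for start, end in zip(idxs, idxs[1:] + [len(lines)])
  let reqs := (idxs.zip ((PySem.List.slice idxs (some 1) none) ++ [lines.length])).map (fun p =>
    let body := ((PySem.List.slice lines (some ((p.1 : Int) + 1)) (some (p.2 : Int))).filter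
        (fun ln => PySem.Str.strip ln != "")).map PySem.Str.strip
    PySem.Str.strip (PySem.Str.join "\n"
      (PySem.Str.strip (PySem.Str.slice (lines.getD p.1 "") (some 2) none) :: body)))
  if reqs.isEmpty then
    -- content.split("\n\n"): sep is the nonempty literal, so split? is always some
    (((PySem.Str.split? content "\n\n").getD []).filter (fun r => PySem.Str.strip r != "")).map PySem.Str.strip
  else reqs

-- ===== PRECONDITION & SPEC =====
def Spec_parse_requirements_file_py (content : String) (out : List String) : Prop := out = parse_requirements_file_py_alt content
instance (content : String) (out : List String) : Decidable (Spec_parse_requirements_file_py content out) := by unfold Spec_parse_requirements_file_py; infer_instance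

-- ===== CLAIM (what is proved, stated in full; the proofs are below) =====
def Claim_equal_parse_requirements_file_py : Prop := ∀ (content : String), Dom_parse_requirements_file_py content → Spec_parse_requirements_file_py content (parse_requirements_file_py content)

-- ===== LEMMAS AND PROOFS =====

def hdrB (l : String) : Bool := PySem.Str.startswith l "# "
def nbB (l : String) : Bool := PySem.Str.strip l != ""
def hdS (l : String) : String := PySem.Str.strip (PySem.Str.slice l (some 2) none)

-- the middle spec: A's grouping, written as structural recursion
def grpAux (cur : List String) : List String → List (List String)
  | [] => [cur]
  | l :: ls =>
      if hdrB l then cur :: grpAux [hdS l] ls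
      else if nbB l then grpAux (cur ++ [PySem.Str.strip l]) ls
      else grpAux cur ls

def idxsOfN : List String → List Nat
  | [] => []
  | l :: ls => if hdrB l then 0 :: (idxsOfN ls).map (· + 1) else (idxsOfN ls).map (· + 1)

def segOf (lines : List String) (p : Nat × Nat) : String :=
  PySem.Str.strip (PySem.Str.join "\n"
    (hdS (lines.getD p.1 "") ::
      ((PySem.List.slice lines (some ((p.1 : Int) + 1)) (some (p.2 : Int))).filter nbB).map PySem.Str.strip))

def segsFrom (lines : List String) (idxs : List Nat) : List String :=
  (idxs.zip ((PySem.List.slice idxs (some 1) none) ++ [lines.length])).map (segOf lines)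

def paFinish (st : List String × List String) : List String :=
  if st.2 = [] then st.1 else st.1 ++ [paFlush st.2]

theorem zipIdx_filterMap_eq (ls : List String) : ∀ n : Nat,
    (List.zipIdx ls n).filterMap (fun p => if hdrB p.1 then some p.2 else none)
      = (idxsOfN ls).map (· + n) := by
  induction ls with
  | nil => intro n; simp [idxsOfN]
  | cons l ls ih =>
      intro n
      have hc : ((· + n) ∘ (· + (1:Nat))) = (· + (n+1)) := by funext k; simp; omega
      by_cases h : hdrB l = true
      · simp [List.zipIdx_cons, idxsOfN, h, ih (n+1), List.map_map, hc]
      · simp only [Bool.not_eq_true] at h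
        simp [List.zipIdx_cons, idxsOfN, h, ih (n+1), List.map_map, hc]

theorem idxsOfN_nil_of_nohdr (ls : List String) (h : ∀ x ∈ ls, hdrB x = false) :
    idxsOfN ls = [] := by
  induction ls with
  | nil => rfl
  | cons l ls ih =>
      have := h l (by simp)
      simp [idxsOfN, this, ih (fun x hx => h x (by simp [hx]))]

theorem decomp (ls : List String) :
    (∀ x ∈ ls, hdrB x = false) ∨
    ∃ pre l rest, ls = pre ++ l :: rest ∧ (∀ x ∈ pre, hdrB x = false) ∧ hdrB l = true := by
  induction ls with
  | nil => left; simp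
  | cons a ls ih =>
      by_cases ha : hdrB a = true
      · right; exact ⟨[], a, ls, by simp, by simp, ha⟩
      · simp only [Bool.not_eq_true] at ha
        rcases ih with h | ⟨pre, l, rest, rfl, hpre, hl⟩
        · left; intro x hx
          rcases List.mem_cons.mp hx with rfl | hx
          · exact ha
          · exact h x hx
        · right
          refine ⟨a :: pre, l, rest, by simp, ?_, hl⟩
          intro x hx
          rcases List.mem_cons.mp hx with rfl | hx
          · exact ha
          · exact hpre x hx

theorem foldl_nohdr (ls : List String) (h : ∀ x ∈ ls, hdrB x = false) (acc : List String) :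
    ls.foldl paStep (acc, []) = (acc, []) := by
  induction ls generalizing acc with
  | nil => rfl
  | cons l ls ih =>
      have hl := h l (by simp)
      simp only [hdrB] at hl
      simp at hl
      have hstep : paStep (acc, []) l = (acc, []) := by
        simp [paStep, hl]
      simp only [List.foldl_cons, hstep]
      exact ih (fun x hx => h x (by simp [hx])) acc

theorem foldl_grp (ls : List String) : ∀ (acc cur : List String), cur ≠ [] →
    paFinish (ls.foldl paStep (acc, cur)) = acc ++ (grpAux cur ls).map paFlush := by
  induction ls with
  | nil =>
      intro acc cur hcur
      simp [paFinish, grpAux, hcur]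
  | cons l ls ih =>
      intro acc cur hcur
      by_cases hl : hdrB l = true
      · have hl' := hl
        simp only [hdrB] at hl'; simp at hl'
        have hstep : paStep (acc, cur) l
            = (acc ++ [paFlush cur], [PySem.Str.strip (PySem.Str.slice l (some 2) none)]) := by
          simp [paStep, hl', hcur]
        simp only [List.foldl_cons, hstep]
        rw [ih (acc ++ [paFlush cur]) _ (by simp)]
        simp [grpAux, hl, hdS]
      · simp only [Bool.not_eq_true] at hl
        have hl' := hl
        simp only [hdrB] at hl'; simp at hl'
        by_cases hn : nbB l = true
        · have hn' := hn
          simp only [nbB] at hn'; simp at hn'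
          have hstep : paStep (acc, cur) l = (acc, cur ++ [PySem.Str.strip l]) := by
            simp [paStep, hl', hn', hcur]
          simp only [List.foldl_cons, hstep]
          rw [ih acc _ (by simp)]
          simp [grpAux, hl, hn]
        · simp only [Bool.not_eq_true] at hn
          have hn' := hn
          simp only [nbB] at hn'; simp at hn'
          have hstep : paStep (acc, cur) l = (acc, cur) := by
            simp [paStep, hl', hn']
          simp only [List.foldl_cons, hstep]
          rw [ih acc cur hcur]
          simp [grpAux, hl, hn]

theorem grpAux_append (pre : List String) (h : ∀ x ∈ pre, hdrB x = false) :
    ∀ (cur rest : List String),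
    grpAux cur (pre ++ rest) = grpAux (cur ++ (pre.filter nbB).map PySem.Str.strip) rest := by
  induction pre with
  | nil => intro cur rest; simp
  | cons x pre ih =>
      intro cur rest
      have hx := h x (by simp)
      by_cases hn : nbB x = true
      · simp only [List.cons_append, grpAux, hx, hn, Bool.false_eq_true, if_false, if_true]
        rw [ih (fun y hy => h y (by simp [hy]))]
        simp [hn]
      · simp only [Bool.not_eq_true] at hn
        simp only [List.cons_append, grpAux, hx, hn, Bool.false_eq_true, if_false]
        rw [ih (fun y hy => h y (by simp [hy]))]
        simp [hn]

theorem grpAux_nohdr (ls : List String) (h : ∀ x ∈ ls, hdrB x = false) (cur : List String) :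
    grpAux cur ls = [cur ++ (ls.filter nbB).map PySem.Str.strip] := by
  have := grpAux_append ls h cur []
  simpa [grpAux] using this

theorem idxsOfN_append (pre : List String) (h : ∀ x ∈ pre, hdrB x = false) (xs : List String) :
    idxsOfN (pre ++ xs) = (idxsOfN xs).map (· + pre.length) := by
  induction pre with
  | nil => simp
  | cons a pre ih =>
      have ha := h a (by simp)
      have hc : ((· + (1:Nat)) ∘ (· + pre.length)) = (· + (pre.length + 1)) := by
        funext k; simp; omega
      simp only [List.cons_append, idxsOfN, ha, Bool.false_eq_true, if_false]
      rw [ih (fun y hy => h y (by simp [hy]))]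
      simp [List.map_map, hc]

theorem segOf_shift (x : String) (xs : List String) (i e : Nat) :
    segOf (x :: xs) (i + 1, e + 1) = segOf xs (i, e) := by
  have hs : PySem.List.slice (x :: xs) (some (((i + 1 : Nat) : Int) + 1)) (some ((e + 1 : Nat) : Int))
      = PySem.List.slice xs (some (((i : Nat) : Int) + 1)) (some ((e : Nat) : Int)) := by
    rw [PySem.List.slice_toNat _ (by omega) (by omega), PySem.List.slice_toNat _ (by omega) (by omega)]
    have h1 : (((i + 1 : Nat) : Int) + 1).toNat = i + 2 := by omega
    have h2 : ((e + 1 : Nat) : Int).toNat = e + 1 := by omega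
    have h3 : (((i : Nat) : Int) + 1).toNat = i + 1 := by omega
    have h4 : ((e : Nat) : Int).toNat = e := by omega
    rw [h1, h2, h3, h4]
    have h5 : e + 1 - (i + 2) = e - (i + 1) := by omega
    rw [h5, List.drop_succ_cons]
  simp only [segOf, hs, List.getD_cons_succ]

theorem segOf_zero (l : String) (rest : List String) (e : Nat) :
    segOf (l :: rest) (0, e)
      = paFlush (hdS l :: ((rest.take (e - 1)).filter nbB).map PySem.Str.strip) := by
  have hs : PySem.List.slice (l :: rest) (some (((0 : Nat) : Int) + 1)) (some ((e : Nat) : Int))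
      = rest.take (e - 1) := by
    rw [PySem.List.slice_toNat _ (by omega) (by omega)]
    have h1 : (((0 : Nat) : Int) + 1).toNat = 1 := by omega
    have h2 : ((e : Nat) : Int).toNat = e := by omega
    rw [h1, h2]
    simp
  simp only [segOf, hs, List.getD_cons_zero, paFlush]

theorem segsFrom_cons_shift (x : String) (xs : List String) (J : List Nat) :
    segsFrom (x :: xs) (J.map (· + 1)) = segsFrom xs J := by
  simp only [segsFrom, PySem.List.slice_from_one]
  have ht : (J.map (· + 1)).tail ++ [(x :: xs).length] = (J.tail ++ [xs.length]).map (· + 1) := by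
    simp [List.map_tail]
  rw [ht, List.zip_map, List.map_map]
  apply List.map_congr_left
  intro p _
  obtain ⟨i, e⟩ := p
  exact segOf_shift x xs i e

theorem segsFrom_append_shift (pre : List String) : ∀ (xs : List String) (J : List Nat),
    segsFrom (pre ++ xs) (J.map (· + pre.length)) = segsFrom xs J := by
  induction pre with
  | nil => intro xs J; simp
  | cons a pre ih =>
      intro xs J
      have hc : J.map (· + (a :: pre).length) = (J.map (· + pre.length)).map (· + 1) := by
        simp only [List.map_map]
        apply List.map_congr_left
        intro k _
        simp; omega
      rw [hc]
      show segsFrom (a :: (pre ++ xs)) ((J.map (· + pre.length)).map (· + 1)) = segsFrom xs J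
      rw [segsFrom_cons_shift, ih]

theorem segsFrom_cons_pair (X : List String) (j : Nat) (J : List Nat) :
    segsFrom X (j :: J) = segOf X (j, (J ++ [X.length]).headD 0) :: segsFrom X J := by
  cases J with
  | nil => simp [segsFrom, PySem.List.slice_from_one]
  | cons j' J' => simp [segsFrom, PySem.List.slice_from_one]

theorem core_nohdr (rest : List String) (hnh : ∀ x ∈ rest, hdrB x = false) (l : String) :
    segsFrom (l :: rest) (0 :: (idxsOfN rest).map (· + 1))
      = (grpAux [hdS l] rest).map paFlush := by
  rw [idxsOfN_nil_of_nohdr rest hnh, List.map_nil, segsFrom_cons_pair, grpAux_nohdr rest hnh]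
  have hh : (([] : List Nat) ++ [(l :: rest).length]).headD 0 = rest.length + 1 := by simp
  rw [hh, segOf_zero]
  have ht : rest.take (rest.length + 1 - 1) = rest := by simp
  rw [ht]
  simp [segsFrom]

theorem core (n : Nat) : ∀ (rest : List String), rest.length ≤ n → ∀ l, hdrB l = true →
    segsFrom (l :: rest) (0 :: (idxsOfN rest).map (· + 1))
      = (grpAux [hdS l] rest).map paFlush := by
  induction n with
  | zero =>
      intro rest hlen l _
      have : rest = [] := List.length_eq_zero_iff.mp (Nat.le_zero.mp hlen)
      subst this
      exact core_nohdr [] (by simp) l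
  | succ n ih =>
      intro rest hlen l hl
      rcases decomp rest with hnh | ⟨pre, l', rest', rfl, hpre, hl'⟩
      · exact core_nohdr rest hnh l
      · -- next header l' at position pre.length
        have hidx : (idxsOfN (pre ++ l' :: rest')).map (· + 1)
            = (pre.length + 1) ::
              ((idxsOfN rest').map (· + 1)).map (· + (pre.length + 1)) := by
          rw [idxsOfN_append pre hpre]
          have h1 : idxsOfN (l' :: rest') = 0 :: (idxsOfN rest').map (· + 1) := by
            simp [idxsOfN, hl']
          rw [h1]
          simp only [List.map_cons, List.map_map]
          simp only [Nat.zero_add]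
          congr 1
        rw [hidx, segsFrom_cons_pair]
        have hheadD : ((((pre.length + 1) ::
            ((idxsOfN rest').map (· + 1)).map (· + (pre.length + 1))) ++
              [(l :: (pre ++ l' :: rest')).length]).headD 0) = pre.length + 1 := by simp
        rw [hheadD, segOf_zero]
        have htk : (pre ++ l' :: rest').take (pre.length + 1 - 1) = pre := by
          simp
        rw [htk]
        -- tail segments: shift past the prefix  l :: pre  and recurse
        have htail : segsFrom (l :: (pre ++ l' :: rest'))
              ((pre.length + 1) :: ((idxsOfN rest').map (· + 1)).map (· + (pre.length + 1)))
            = (grpAux [hdS l'] rest').map paFlush := by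
          have hsh : (pre.length + 1) :: ((idxsOfN rest').map (· + 1)).map (· + (pre.length + 1))
              = (0 :: (idxsOfN rest').map (· + 1)).map (· + (l :: pre).length) := by
            simp
          have happ : l :: (pre ++ l' :: rest') = (l :: pre) ++ (l' :: rest') := by simp
          rw [hsh, happ, segsFrom_append_shift]
          exact ih rest' (by simp at hlen; omega) l' hl'
        rw [htail]
        rw [grpAux_append pre hpre]
        have hgrp : grpAux ([hdS l] ++ (pre.filter nbB).map PySem.Str.strip) (l' :: rest')
            = (hdS l :: (pre.filter nbB).map PySem.Str.strip) :: grpAux [hdS l'] rest' := by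
          simp [grpAux, hl']
        rw [hgrp]
        simp

theorem main_eq (ls : List String) :
    paFinish (ls.foldl paStep ([], [])) = segsFrom ls (idxsOfN ls) := by
  rcases decomp ls with hnh | ⟨pre, l, rest, rfl, hpre, hl⟩
  · rw [foldl_nohdr ls hnh, idxsOfN_nil_of_nohdr ls hnh]
    simp [paFinish, segsFrom]
  · rw [List.foldl_append, foldl_nohdr pre hpre]
    have hl' := hl
    simp only [hdrB] at hl'; simp at hl'
    have hstep : paStep ([], []) l = ([], [hdS l]) := by
      simp [paStep, hl', hdS]
    simp only [List.foldl_cons, hstep]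
    rw [foldl_grp rest [] [hdS l] (by simp)]
    rw [idxsOfN_append pre hpre]
    have h1 : idxsOfN (l :: rest) = 0 :: (idxsOfN rest).map (· + 1) := by simp [idxsOfN, hl]
    rw [h1, segsFrom_append_shift, core rest.length rest le_rfl l hl]
    simp

-- ===== VERDICT (by name: the statement is the Claim_ definition above) =====
theorem parse_requirements_file_py_spec : Claim_equal_parse_requirements_file_py := by
  intro content _
  unfold Spec_parse_requirements_file_py
  have hA : parse_requirements_file_py content
      = (if paFinish ((PySem.Str.splitlines content).foldl paStep ([], [])) = []
         then (((PySem.Str.split? content "\n\n").getD []).filter (fun r => PySem.Str.strip r != "")).map PySem.Str.strip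
         else paFinish ((PySem.Str.splitlines content).foldl paStep ([], []))) := rfl
  have hB : parse_requirements_file_py_alt content
      = (if (segsFrom (PySem.Str.splitlines content)
              (((PySem.Str.splitlines content).zipIdx).filterMap
                (fun p => if hdrB p.1 then some p.2 else none))).isEmpty
         then (((PySem.Str.split? content "\n\n").getD []).filter (fun r => PySem.Str.strip r != "")).map PySem.Str.strip
         else segsFrom (PySem.Str.splitlines content)
              (((PySem.Str.splitlines content).zipIdx).filterMap
                (fun p => if hdrB p.1 then some p.2 else none))) := rfl
  rw [hA, hB, zipIdx_filterMap_eq]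
  have h0 : (idxsOfN (PySem.Str.splitlines content)).map (· + 0)
      = idxsOfN (PySem.Str.splitlines content) := by simp
  rw [h0, main_eq]
  by_cases h : segsFrom (PySem.Str.splitlines content) (idxsOfN (PySem.Str.splitlines content)) = []
  · simp [h]
  · simp [h, List.isEmpty_iff]
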